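-- pv_equiv track=rewrite | github.com/gurevichlab/nerpa | src/generic/combinatorics.py | split_into_k_blocks
-- ===== SOURCE A (Python) =====
-- from typing import (
--     Callable,
--     Generator,
--     Iterable,
--     List,
--     Tuple,
--     TypeVar, Optional
-- )
--
-- T = TypeVar('T')
--
-- def split_into_k_blocks(seq: List[T], k: int) -> Generator[List[List[T]], None, None]:
--     """Generate all ways to split a sequence into exactly k non-empty blocks."""
--     if k == 1:
--         yield [seq]  # Only one way to split the sequence into 1 block (the sequence itself)
--         return
--
--     # Iterate through all possible first blocks
--     for i in range(1, len(seq) - k + 2):  # Leave room for at least k-1 more blocks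
--         first_part = seq[:i]
--         # Recursively split the remaining sequence into k-1 blocks
--         for rest in split_into_k_blocks(seq[i:], k - 1):
--             yield [first_part] + rest
-- ===== SOURCE B (Python) =====
-- def split_into_k_blocks(seq, k):
--     """Generate all splits of seq into exactly k non-empty blocks, layer by layer.
--
--     Iterative breadth-first construction: maintain the list of partial splits
--     (cut position reached, blocks so far) and extend every partial split by one
--     more cut per round; a round with r cuts still to place may cut no further
--     than len(seq) - r.  Emission order is lexicographic in the cut positions,
--     the same order as the recursive version.
--     """
--     if k < 1:
--         return
--     n = len(seq)
--     partial = [(0, [])]  # (start, blocks): blocks tile seq[:start]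
--     for r in range(k - 1, 0, -1):  # r = cuts still to place (this one included)
--         if not partial:
--             break  # no partial split can be extended any further
--         partial = [(cut, blocks + [seq[start:cut]])
--                    for (start, blocks) in partial
--                    for cut in range(start + 1, n - r + 1)]
--     for start, blocks in partial:
--         yield blocks + [seq[start:]]
-- ===== Notes on version B (the rewrite author's own statement) =====
-- stated objective: alternative
-- what changed: Replaces A's depth-first recursion on the first block by an iterative breadth-first construction: B keeps the list of all partial splits (cut position, blocks so far) and extends every partial split by one cut per round, then appends the final block; no recursion at all.
import Mathlib
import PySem

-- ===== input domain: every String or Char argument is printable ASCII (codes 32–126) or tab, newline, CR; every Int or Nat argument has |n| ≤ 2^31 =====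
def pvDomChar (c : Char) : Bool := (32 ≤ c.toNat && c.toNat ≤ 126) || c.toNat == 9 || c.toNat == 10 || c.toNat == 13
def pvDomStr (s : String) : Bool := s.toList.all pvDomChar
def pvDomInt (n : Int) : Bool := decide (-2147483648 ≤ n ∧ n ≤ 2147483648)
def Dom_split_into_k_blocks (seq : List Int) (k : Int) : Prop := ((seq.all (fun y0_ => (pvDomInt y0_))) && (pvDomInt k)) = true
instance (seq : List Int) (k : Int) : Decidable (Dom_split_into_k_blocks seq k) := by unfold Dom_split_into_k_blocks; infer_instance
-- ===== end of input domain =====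

-- B replaces A's depth-first recursion on the first block by an iterative breadth-first
-- construction over partial splits (objective: alternative; equal return values on k ≥ 1).

-- ===== PORT A =====
-- A recurses on k; for k ≥ 1 the recursion depth is exactly k, so fuel k.toNat suffices on
-- Pre_; for k ≤ 0 the Python recursion never terminates (outside Pre_).
def splitAux : Nat → List Int → Int → List (List (List Int))
  | 0, _, _ => []
  | fuel+1, seq, k =>
    if k = 1 then [[seq]]
    else
      (PySem.List.pyRange 1 ((seq.length : Int) - k + 2) 1).foldl
        (fun acc i =>
          acc ++ (splitAux fuel (PySem.List.slice seq (some i) none) (k - 1)).map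
            (fun rest => PySem.List.slice seq none (some i) :: rest))
        []

def split_into_k_blocks (seq : List Int) (k : Int) : List (List (List Int)) :=
  splitAux k.toNat seq k

-- ===== PORT B =====
-- 'for r in range(k-1, 0, -1): partial = [...]' — structural countdown on r, the number of
-- cuts still to place; each state is (start, blocks) with blocks tiling seq[:start].
def altLoop (seq : List Int) (n : Int) : Nat → List (Int × List (List Int)) → List (Int × List (List Int))
  | 0, part => part
  | r+1, part =>
      if part.isEmpty then part
      else altLoop seq n r
        (part.flatMap (fun p =>
          (PySem.List.pyRange (p.1 + 1) (n - ((r : Int) + 1) + 1) 1).map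
            (fun cut => (cut, p.2 ++ [PySem.List.slice seq (some p.1) (some cut)]))))

def split_into_k_blocks_alt (seq : List Int) (k : Int) : List (List (List Int)) :=
  if k < 1 then []
  else
    (altLoop seq (seq.length : Int) (k - 1).toNat [((0 : Int), ([] : List (List Int)))]).map
      (fun p => p.2 ++ [PySem.List.slice seq (some p.1) none])

-- ===== PRECONDITION & SPEC =====
-- Pre_ excludes exactly k ≤ 0, where the Python A recurses forever (RecursionError).
def Pre_split_into_k_blocks (seq : List Int) (k : Int) : Prop := 1 ≤ k
instance (seq : List Int) (k : Int) : Decidable (Pre_split_into_k_blocks seq k) := by unfold Pre_split_into_k_blocks; infer_instance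
def pvWitness_split_into_k_blocks : List Int × Int := ([1, 2, 3], 2)

def Spec_split_into_k_blocks (seq : List Int) (k : Int) (out : List (List (List Int))) : Prop := out = split_into_k_blocks_alt seq k
instance (seq : List Int) (k : Int) (out : List (List (List Int))) : Decidable (Spec_split_into_k_blocks seq k out) := by unfold Spec_split_into_k_blocks; infer_instance

-- ===== CLAIM (what is proved, stated in full; the proofs are below) =====
def Claim_equal_split_into_k_blocks : Prop := ∀ (seq : List Int) (k : Int), Dom_split_into_k_blocks seq k → Pre_split_into_k_blocks seq k → Spec_split_into_k_blocks seq k (split_into_k_blocks seq k)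

-- ===== LEMMAS AND PROOFS =====

-- One recursion step of A, re-indexed to absolute cut positions in seq.
lemma splitAux_step (seq : List Int) (s : Int) (r : Nat)
    (hs0 : 0 ≤ s) (hsl : s ≤ (seq.length : Int)) :
    splitAux (r+2) (seq.drop s.toNat) ((r : Int) + 2)
      = (PySem.List.pyRange (s + 1) ((seq.length : Int) - r) 1).flatMap
          (fun cut => (splitAux (r+1) (seq.drop cut.toNat) ((r : Int) + 1)).map
            (fun rest => PySem.List.slice seq (some s) (some cut) :: rest)) := by
  have hk : ¬ ((r : Int) + 2 = 1) := by omega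
  have hlen : ((seq.drop s.toNat).length : Int) = (seq.length : Int) - s := by
    simp [List.length_drop]; omega
  rw [show r + 2 = (r + 1) + 1 from rfl]
  simp only [splitAux, hk, if_false, hlen]
  rw [PySem.List.foldl_append_eq_flatMap]
  have hb1 : (seq.length : Int) - s - ((r:Int)+2) + 2 = (seq.length : Int) - s - r := by ring
  rw [hb1, List.nil_append]
  rw [PySem.List.pyRange_one 1 ((seq.length : Int) - s - r),
      PySem.List.pyRange_one (s+1) ((seq.length : Int) - r)]
  have hN : ((seq.length : Int) - s - r - 1).toNat = ((seq.length : Int) - r - (s+1)).toNat := by omega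
  rw [hN, List.flatMap_map, List.flatMap_map]
  apply List.flatMap_congr
  intro t ht
  have h1 : (0:Int) ≤ 1 + (t:Int) := by omega
  have h2 : (0:Int) ≤ s + 1 + (t:Int) := by omega
  rw [PySem.List.slice_from _ h1, PySem.List.slice_to _ h1,
      PySem.List.slice_toNat seq hs0 h2]
  have e1 : ((1:Int) + (t:Int)).toNat = 1 + t := by omega
  have e2 : (s + 1 + (t:Int)).toNat = s.toNat + (1 + t) := by omega
  have e3 : (s + 1 + (t:Int)).toNat - s.toNat = 1 + t := by omega
  rw [e3, e2, e1, List.drop_drop]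
  have e4 : ((r:Int) + 2 - 1) = (r:Int) + 1 := by ring
  rw [e4]

-- Invariant of B's layer loop: running r more rounds and closing off the states computes,
-- for each state, A's splits of the remaining suffix into r+1 blocks, prefixed by its blocks.
lemma altLoop_eq (seq : List Int) : ∀ (r : Nat) (P : List (Int × List (List Int))),
    (∀ p ∈ P, 0 ≤ p.1 ∧ p.1 ≤ (seq.length : Int)) →
    (altLoop seq (seq.length : Int) r P).map (fun p => p.2 ++ [PySem.List.slice seq (some p.1) none])
      = P.flatMap (fun p => (splitAux (r+1) (seq.drop p.1.toNat) ((r : Int) + 1)).map (fun rest => p.2 ++ rest)) := by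
  intro r
  induction r with
  | zero =>
    intro P hP
    simp only [altLoop, splitAux]
    norm_num
    induction P with
    | nil => simp
    | cons p P ihP =>
      have hp := hP p (List.mem_cons_self)
      simp only [List.map_cons, List.flatMap_cons, ihP (fun q hq => hP q (List.mem_cons_of_mem _ hq))]
      rw [PySem.List.slice_from _ hp.1]
      simp
  | succ r ih =>
    intro P hP
    have hQ : ∀ q ∈ P.flatMap (fun p =>
        (PySem.List.pyRange (p.1 + 1) ((seq.length : Int) - ((r : Int) + 1) + 1) 1).map
          (fun cut => (cut, p.2 ++ [PySem.List.slice seq (some p.1) (some cut)]))),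
        0 ≤ q.1 ∧ q.1 ≤ (seq.length : Int) := by
      intro q hq
      rcases List.mem_flatMap.mp hq with ⟨p, hpP, hq2⟩
      rcases List.mem_map.mp hq2 with ⟨cut, hcut, rfl⟩
      have := (PySem.List.mem_pyRange_one.mp hcut)
      have hp := hP p hpP
      constructor <;> simp <;> omega
    simp only [altLoop]
    by_cases hemp : P = []
    · subst hemp; simp
    · rw [if_neg (by simpa [List.isEmpty_iff] using hemp), ih _ hQ]
      rw [List.flatMap_assoc]
      apply List.flatMap_congr
      intro p hp
      have hb : (seq.length : Int) - ((r : Int) + 1) + 1 = (seq.length : Int) - r := by ring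
      have hcast : ((r + 1 : Nat) : Int) + 1 = (r : Int) + 2 := by push_cast; ring
      rw [hcast, show r + 1 + 1 = r + 2 from rfl, splitAux_step seq p.1 r (hP p hp).1 (hP p hp).2]
      rw [List.flatMap_map, List.map_flatMap, hb]
      apply List.flatMap_congr
      intro cut hcut
      simp [List.map_map, Function.comp]

-- ===== VERDICT (by name: the statement is the Claim_ definition above) =====
theorem split_into_k_blocks_spec : Claim_equal_split_into_k_blocks := by
  intro seq k _ hpre
  unfold Pre_split_into_k_blocks at hpre
  unfold Spec_split_into_k_blocks split_into_k_blocks split_into_k_blocks_alt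
  obtain ⟨r, rfl⟩ : ∃ r : Nat, k = (r : Int) + 1 := ⟨(k - 1).toNat, by omega⟩
  rw [if_neg (by omega : ¬ ((r : Int) + 1 < 1))]
  have h1 : ((r : Int) + 1 - 1).toNat = r := by omega
  rw [h1, altLoop_eq seq r _ (by
    intro p hp
    simp only [List.mem_singleton] at hp
    subst hp
    exact ⟨le_refl 0, Int.natCast_nonneg _⟩)]
  have h2 : ((r : Int) + 1).toNat = r + 1 := by omega
  simp [h2]
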